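-- pv_equiv track=rewrite | github.com/pypi-data/pypi-mirror-383 | packages/AlekSIS-Core/aleksis_core-4.1.0.dev2-py3-none-any.whl/aleksis/core/util/core_helpers.py | copyright_years
-- ===== SOURCE A (Python) =====
-- from collections.abc import Sequence
-- from itertools import groupby
-- from operator import itemgetter
--
-- def copyright_years(years: Sequence[int], separator: str = ", ", joiner: str = "–") -> str:
--     """Take a sequence of integers and produces a string with ranges.
--
--     >>> copyright_years([1999, 2000, 2001, 2005, 2007, 2008, 2009])
--     '1999–2001, 2005, 2007–2009'
--     """
--     ranges = [
--         list(map(itemgetter(1), group))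
--         for _, group in groupby(enumerate(years), lambda e: e[1] - e[0])
--     ]
--     years_strs = [
--         str(range_[0]) if len(range_) == 1 else joiner.join([str(range_[0]), str(range_[-1])])
--         for range_ in ranges
--     ]
--
--     return separator.join(years_strs)
-- ===== SOURCE B (Python) =====
-- def copyright_years(years, separator=", ", joiner="\u2013"):
--     if not years:
--         return ""
--     parts = []
--     start = prev = years[0]
--     for year in years[1:]:
--         if year == prev + 1:
--             prev = year
--         else:
--             parts.append(str(start) if start == prev else joiner.join([str(start), str(prev)]))
--             start = prev = year
--     parts.append(str(start) if start == prev else joiner.join([str(start), str(prev)]))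
--     return separator.join(parts)
-- ===== Notes on version B (the rewrite author's own statement) =====
-- stated objective: idiomatic
-- what changed: Replaces the enumerate/groupby-by-(value-index) two-phase construction (build list-of-runs, then a second formatting comprehension) with one explicit pass tracking start/prev that detects and formats each run inline.
import Mathlib
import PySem

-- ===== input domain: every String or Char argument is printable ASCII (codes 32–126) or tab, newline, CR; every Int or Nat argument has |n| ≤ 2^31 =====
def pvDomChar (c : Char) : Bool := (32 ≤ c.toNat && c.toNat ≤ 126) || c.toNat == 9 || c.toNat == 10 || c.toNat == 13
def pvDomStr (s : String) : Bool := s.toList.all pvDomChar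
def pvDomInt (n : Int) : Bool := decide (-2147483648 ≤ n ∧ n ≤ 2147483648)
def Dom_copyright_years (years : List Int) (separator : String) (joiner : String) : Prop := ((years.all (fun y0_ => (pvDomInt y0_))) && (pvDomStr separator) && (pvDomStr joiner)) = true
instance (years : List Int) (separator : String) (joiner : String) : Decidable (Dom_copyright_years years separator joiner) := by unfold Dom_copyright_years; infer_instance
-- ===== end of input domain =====

-- B replaces A's two-phase enumerate/groupby construction with a single explicit
-- start/prev pass that formats each run inline (idiomatic; same cost).

-- ===== PORT A =====
-- groupby(enumerate(years), key = e[1] - e[0]): split the enumerated list into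
-- maximal runs of equal key, comparing each element's key with its successor's.
def cyGroupby : List (Int × Int) → List (List (Int × Int))
  | [] => []
  | x :: xs =>
    match cyGroupby xs with
    | [] => [[x]]
    | [] :: gs => [x] :: [] :: gs  -- unreachable: groups are never empty
    | (y :: g) :: gs =>
      if x.2 - x.1 = y.2 - y.1 then (x :: y :: g) :: gs else [x] :: (y :: g) :: gs

def copyright_years (years : List Int) (separator : String) (joiner : String) : String :=
  let ranges : List (List Int) :=
    (cyGroupby (PySem.List.enumerate years 0)).map (fun g => g.map (·.2))
  let years_strs : List String :=
    ranges.map (fun r =>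
      if r.length = 1 then PySem.Int.toStr r.headI   -- r[0]; runs are nonempty, default unreachable
      else PySem.Str.join joiner [PySem.Int.toStr r.headI, PySem.Int.toStr (r.getLastD 0)])  -- r[0], r[-1]
  PySem.Str.join separator years_strs

-- ===== PORT B =====
def cyFmt (joiner : String) (start prev : Int) : String :=
  if start = prev then PySem.Int.toStr start
  else PySem.Str.join joiner [PySem.Int.toStr start, PySem.Int.toStr prev]

def cyLoop (joiner : String) (start prev : Int) (parts : List String) : List Int → List String
  | [] => parts ++ [cyFmt joiner start prev]
  | y :: ys =>
    if y = prev + 1 then cyLoop joiner start y parts ys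
    else cyLoop joiner y y (parts ++ [cyFmt joiner start prev]) ys

def copyright_years_alt (years : List Int) (separator : String) (joiner : String) : String :=
  match years with
  | [] => ""
  | y :: ys => PySem.Str.join separator (cyLoop joiner y y [] ys)

-- ===== PRECONDITION & SPEC =====
def Spec_copyright_years (years : List Int) (separator : String) (joiner : String) (out : String) : Prop := out = copyright_years_alt years separator joiner
instance (years : List Int) (separator : String) (joiner : String) (out : String) : Decidable (Spec_copyright_years years separator joiner out) := by unfold Spec_copyright_years; infer_instance

-- ===== CLAIM (what is proved, stated in full; the proofs are below) =====
def Claim_equal_copyright_years : Prop := ∀ (years : List Int) (separator : String) (joiner : String), Dom_copyright_years years separator joiner → Spec_copyright_years years separator joiner (copyright_years years separator joiner)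

-- ===== LEMMAS AND PROOFS =====

-- Reference form of B's loop, building the result list front-to-back.
def runsSpec (j : String) (start prev : Int) : List Int → List String
  | [] => [cyFmt j start prev]
  | y :: ys =>
    if y = prev + 1 then runsSpec j start y ys
    else cyFmt j start prev :: runsSpec j y y ys

theorem cyLoop_eq (j : String) (ys : List Int) :
    ∀ (s p : Int) (parts : List String),
      cyLoop j s p parts ys = parts ++ runsSpec j s p ys := by
  induction ys with
  | nil => intro s p parts; simp [cyLoop, runsSpec]
  | cons y ys ih =>
    intro s p parts
    by_cases h : y = p + 1 <;> simp [cyLoop, runsSpec, h, ih]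

-- A's formatter applied to a group of (index, value) pairs.
def fmtP (j : String) (g : List (Int × Int)) : String :=
  let r := g.map (·.2)
  if r.length = 1 then PySem.Int.toStr r.headI
  else PySem.Str.join j [PySem.Int.toStr r.headI, PySem.Int.toStr (r.getLastD 0)]

-- last value of a group
def lastV (g : List (Int × Int)) : Int := (g.getLastD (0, 0)).2

-- A's formatter with the first value overridden by s, the run-end test by s = lastV.
def fmtS (j : String) (s : Int) (g : List (Int × Int)) : String :=
  if s = lastV g then PySem.Int.toStr s
  else PySem.Str.join j [PySem.Int.toStr s, PySem.Int.toStr (lastV g)]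

theorem lastV_cons_cons (a b : Int × Int) (g : List (Int × Int)) :
    lastV (a :: b :: g) = lastV (b :: g) := by
  simp [lastV]

-- Structure of A's groupby on an enumerated list, and its formatted strings.
theorem cyGroupby_enum (j : String) (ys : List Int) :
    ∀ (i y : Int), ∃ g gs,
      cyGroupby (PySem.List.enumerate (y :: ys) i) = ((i, y) :: g) :: gs ∧
      lastV ((i, y) :: g) = y + g.length ∧
      ∀ s : Int, fmtS j s ((i, y) :: g) :: gs.map (fmtP j) = runsSpec j s y ys := by
  induction ys with
  | nil =>
    intro i y
    refine ⟨[], [], ?_, ?_, ?_⟩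
    · simp [PySem.List.enumerate_cons, PySem.List.enumerate_nil, cyGroupby]
    · simp [lastV]
    · intro s
      simp [fmtS, runsSpec, cyFmt, lastV]
  | cons y' ys ih =>
    intro i y
    obtain ⟨g', gs', hEq, hLast, hFmt⟩ := ih (i + 1) y'
    have hEnum : PySem.List.enumerate (y :: y' :: ys) i
        = (i, y) :: PySem.List.enumerate (y' :: ys) (i + 1) := by
      simp [PySem.List.enumerate_cons]
    by_cases h : y' = y + 1
    · -- merged into the first run
      refine ⟨(i + 1, y') :: g', gs', ?_, ?_, ?_⟩
      · rw [hEnum]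
        simp only [cyGroupby, hEq]
        have : (y : Int) - i = y' - (i + 1) := by omega
        simp [this]
      · rw [lastV_cons_cons, hLast]
        simp only [List.length_cons]
        push_cast; omega
      · intro s
        have h1 : fmtS j s ((i, y) :: (i + 1, y') :: g') = fmtS j s ((i + 1, y') :: g') := by
          simp [fmtS, lastV_cons_cons]
        rw [h1, runsSpec, if_pos h, hFmt s]
    · -- new run starts at y'
      refine ⟨[], ((i + 1, y') :: g') :: gs', ?_, ?_, ?_⟩
      · rw [hEnum]
        simp only [cyGroupby, hEq]
        have : ¬ ((y : Int) - i = y' - (i + 1)) := by omega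
        simp [this]
      · simp [lastV]
      · intro s
        have hfp : fmtP j ((i + 1, y') :: g') = fmtS j y' ((i + 1, y') :: g') := by
          simp only [fmtP, fmtS]
          have hl : ((i + 1, y') :: g').map (·.2) = y' :: g'.map (·.2) := by simp
          by_cases hg : g' = []
          · subst hg; simp [lastV]
          · have hlen : ¬ ((((i + 1, y') :: g').map (·.2)).length = 1) := by
              simp [hg]
            have hne : ¬ (y' = lastV ((i + 1, y') :: g')) := by
              rw [hLast]
              have : g'.length ≠ 0 := by simpa using hg
              omega
            rw [if_neg hlen, if_neg hne]
            have hh : (((i + 1, y') :: g').map (·.2)).headI = y' := by simp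
            have hgl : (((i + 1, y') :: g').map (·.2)).getLastD 0 = lastV ((i + 1, y') :: g') := by
              simp only [lastV, List.getLastD_eq_getLast?, List.getLast?_map]
              cases hgg : ((i + 1, y') :: g').getLast? with
              | none => simp at hgg
              | some p => simp
            rw [hh, hgl]
        rw [runsSpec, if_neg h]
        simp only [List.map_cons, hfp]
        rw [hFmt y']
        congr 1

theorem fmtP_eq_fmtS (j : String) (i y : Int) (g : List (Int × Int))
    (hLast : lastV ((i, y) :: g) = y + g.length) :
    fmtP j ((i, y) :: g) = fmtS j y ((i, y) :: g) := by
  simp only [fmtP, fmtS]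
  by_cases hg : g = []
  · subst hg; simp [lastV] at hLast ⊢
  · have hlen : ¬ ((((i, y) :: g).map (·.2)).length = 1) := by simp [hg]
    have hne : ¬ (y = lastV ((i, y) :: g)) := by
      rw [hLast]
      have : g.length ≠ 0 := by simpa using hg
      omega
    rw [if_neg hlen, if_neg hne]
    have hh : (((i, y) :: g).map (·.2)).headI = y := by simp
    have hgl : (((i, y) :: g).map (·.2)).getLastD 0 = lastV ((i, y) :: g) := by
      simp only [lastV, List.getLastD_eq_getLast?, List.getLast?_map]
      cases hgg : ((i, y) :: g).getLast? with
      | none => simp at hgg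
      | some p => simp
    rw [hh, hgl]

-- ===== VERDICT (by name: the statement is the Claim_ definition above) =====
theorem copyright_years_spec : Claim_equal_copyright_years := by
  intro years separator joiner _
  unfold Spec_copyright_years
  cases years with
  | nil =>
    simp [copyright_years, copyright_years_alt, PySem.List.enumerate_nil, cyGroupby,
      PySem.Str.join]
  | cons y ys =>
    obtain ⟨g, gs, hEq, hLast, hFmt⟩ := cyGroupby_enum joiner ys 0 y
    have hA : copyright_years (y :: ys) separator joiner
        = PySem.Str.join separator
            ((cyGroupby (PySem.List.enumerate (y :: ys) 0)).map (fmtP joiner)) := by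
      simp only [copyright_years, List.map_map]
      rfl
    rw [hA, hEq]
    have h2 : List.map (fmtP joiner) ((((0 : Int), y) :: g) :: gs)
        = fmtS joiner y (((0 : Int), y) :: g) :: gs.map (fmtP joiner) := by
      simp [fmtP_eq_fmtS joiner 0 y g hLast]
    rw [h2, hFmt y]
    simp [copyright_years_alt, cyLoop_eq]
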